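-- pv_equiv track=rewrite | github.com/synsless/avabur-clan-stats | rendermarket.py | idx2val
-- ===== SOURCE A (Python) =====
-- def idx2val(lst, target):
--     idx = target
--     for rec in lst:
--         if rec[1] < idx:
--             idx -= rec[1]
--             continue
--         else:
--             return rec[0]
-- ===== SOURCE B (Python) =====
-- def idx2val(lst, target):
--     # Build the prefix-sum table of counts, then return the name at the first
--     # position whose running total reaches target (fixed target, no mutation).
--     totals = []
--     s = 0
--     for _, c in lst:
--         s += c
--         totals.append(s)
--     for (name, _), t in zip(lst, totals):
--         if t >= target:
--             return name
--     return None
-- ===== Notes on version B (the rewrite author's own statement) =====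
-- stated objective: alternative
-- what changed: B builds a prefix-sum table of the counts once and returns the name at the first position whose running total reaches the fixed target, instead of A's walk that repeatedly subtracts each count from a mutating index.
import Mathlib
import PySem

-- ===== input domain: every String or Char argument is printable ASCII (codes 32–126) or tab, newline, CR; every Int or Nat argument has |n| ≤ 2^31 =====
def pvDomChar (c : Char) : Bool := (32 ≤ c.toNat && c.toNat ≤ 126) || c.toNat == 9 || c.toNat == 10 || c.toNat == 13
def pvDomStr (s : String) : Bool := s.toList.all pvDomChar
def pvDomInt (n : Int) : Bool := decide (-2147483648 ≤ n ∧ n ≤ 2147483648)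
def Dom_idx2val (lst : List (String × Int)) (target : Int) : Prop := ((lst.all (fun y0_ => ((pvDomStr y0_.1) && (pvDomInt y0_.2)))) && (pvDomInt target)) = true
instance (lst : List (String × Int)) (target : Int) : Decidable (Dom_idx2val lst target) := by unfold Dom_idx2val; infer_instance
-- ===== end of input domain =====

-- B replaces A's subtract-and-walk by a prefix-sum table plus a first-match scan
-- against the fixed target (alternative decomposition, same return value).

-- ===== PORT A =====
-- A's loop: mutate idx, subtracting each count while it is < idx; fall through = None.
def idx2val (lst : List (String × Int)) (target : Int) : Option String :=
  match lst with
  | [] => none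
  | rec :: rest => if rec.2 < target then idx2val rest (target - rec.2) else some rec.1

-- ===== PORT B =====
-- first loop of Source B: running totals s of the counts, appended in order
def pvTotals (s : Int) (lst : List (String × Int)) : List Int :=
  match lst with
  | [] => []
  | p :: rest => (s + p.2) :: pvTotals (s + p.2) rest

-- second loop of Source B: first pair whose running total reaches target
def pvFindFirst (target : Int) (zs : List ((String × Int) × Int)) : Option String :=
  match zs with
  | [] => none
  | (p, t) :: rest => if t ≥ target then some p.1 else pvFindFirst target rest

def idx2val_alt (lst : List (String × Int)) (target : Int) : Option String :=
  pvFindFirst target (lst.zip (pvTotals 0 lst))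

-- ===== PRECONDITION & SPEC =====
def Spec_idx2val (lst : List (String × Int)) (target : Int) (out : Option String) : Prop := out = idx2val_alt lst target
instance (lst : List (String × Int)) (target : Int) (out : Option String) : Decidable (Spec_idx2val lst target out) := by unfold Spec_idx2val; infer_instance

-- ===== CLAIM (what is proved, stated in full; the proofs are below) =====
def Claim_equal_idx2val : Prop := ∀ (lst : List (String × Int)) (target : Int), Dom_idx2val lst target → Spec_idx2val lst target (idx2val lst target)

-- ===== LEMMAS AND PROOFS =====
-- Invariant: A run with the residual index target - s equals B's scan of the
-- zip with running totals started at s.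
theorem idx2val_shift (lst : List (String × Int)) (s target : Int) :
    idx2val lst (target - s) = pvFindFirst target (lst.zip (pvTotals s lst)) := by
  induction lst generalizing s with
  | nil => simp [idx2val, pvTotals, pvFindFirst]
  | cons p rest ih =>
    simp only [idx2val, pvTotals, List.zip_cons_cons, pvFindFirst]
    by_cases h : p.2 < target - s
    · rw [if_pos h, if_neg (by omega), show target - s - p.2 = target - (s + p.2) by ring, ih]
    · rw [if_neg h, if_pos (by omega)]

-- ===== VERDICT (by name: the statement is the Claim_ definition above) =====
theorem idx2val_spec : Claim_equal_idx2val := by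
  intro lst target _
  unfold Spec_idx2val idx2val_alt
  simpa using idx2val_shift lst 0 target
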